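-- pv_equiv track=rewrite | github.com/agolikova/Rosalind-Bioinformatics-Solutions | Code/GRPH_Overlap graphs.py | k_edges
-- ===== SOURCE A (Python) =====
-- import itertools
--
-- def is_k_overlap(s1, s2, k):
--     """Checks whether a string s1 has a k-suffix matching the k-prefix of a string s2"""
--
--     return s1[-k:] == s2[:k]
--
-- def k_edges(data, k):
--     """Looks at all combinations of DNA sequences to find those that match, returns adjacency list"""
--
--     edges = []
--
--     for u,v in itertools.combinations(data, 2):
--         u_dna, v_dna = data[u], data[v]
--
--         if is_k_overlap(u_dna, v_dna, k):
--             edges.append((u + " " + v))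
--
--         if is_k_overlap(v_dna, u_dna, k):
--             edges.append((v + " " + u))
--
--     return edges
-- ===== SOURCE B (Python) =====
-- def k_edges(data, k):
--     """Overlap-graph edges via a k-prefix index: bucket sequence indices by
--     k-prefix and k-suffix, then for each source merge the two ascending
--     index lists to emit edges in the same pair-major order."""
--
--     names = list(data)
--     seqs = list(data.values())
--     n = len(names)
--     by_prefix = {}
--     by_suffix = {}
--     for j in range(n):
--         by_prefix.setdefault(seqs[j][:k], []).append(j)
--         by_suffix.setdefault(seqs[j][-k:], []).append(j)
--     edges = []
--     for i in range(n):
--         outs = [j for j in by_prefix.get(seqs[i][-k:], []) if j > i]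
--         ins = [j for j in by_suffix.get(seqs[i][:k], []) if j > i]
--         a = b = 0
--         while a < len(outs) and b < len(ins):
--             if outs[a] < ins[b]:
--                 edges.append(names[i] + " " + names[outs[a]]); a += 1
--             elif ins[b] < outs[a]:
--                 edges.append(names[ins[b]] + " " + names[i]); b += 1
--             else:
--                 edges.append(names[i] + " " + names[outs[a]]); a += 1
--                 edges.append(names[ins[b]] + " " + names[i]); b += 1
--         while a < len(outs):
--             edges.append(names[i] + " " + names[outs[a]]); a += 1
--         while b < len(ins):
--             edges.append(names[ins[b]] + " " + names[i]); b += 1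
--     return edges
-- ===== Notes on version B (the rewrite author's own statement) =====
-- stated objective: faster
-- what changed: Replaces the O(n^2) scan over all key pairs with two hash indexes (k-prefix -> indices, k-suffix -> indices) built in one pass; for each source the two ascending candidate index lists are merged to reproduce A's pair-major edge order without examining non-matching pairs.
import Mathlib
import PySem

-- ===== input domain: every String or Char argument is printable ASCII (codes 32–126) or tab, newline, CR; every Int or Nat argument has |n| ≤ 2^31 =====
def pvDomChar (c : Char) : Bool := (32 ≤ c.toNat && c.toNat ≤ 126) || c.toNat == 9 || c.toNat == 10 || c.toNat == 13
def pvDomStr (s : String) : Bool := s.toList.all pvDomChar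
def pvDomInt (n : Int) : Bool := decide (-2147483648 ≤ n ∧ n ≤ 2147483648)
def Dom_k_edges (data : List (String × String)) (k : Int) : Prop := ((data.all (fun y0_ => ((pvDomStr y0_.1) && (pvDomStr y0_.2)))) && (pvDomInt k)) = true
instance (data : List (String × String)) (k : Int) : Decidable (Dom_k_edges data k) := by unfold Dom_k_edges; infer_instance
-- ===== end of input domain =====

-- B replaces A's scan over all key pairs with two hash indexes (k-prefix / k-suffix → indices)
-- and a per-source merge of the two ascending candidate lists; objective: faster.
-- The 'data' dict is ported as an association list; both ports look keys up by first match.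

-- ===== PORT A =====
def is_k_overlap (s1 s2 : String) (k : Int) : Bool :=
  PySem.Str.slice s1 (some (-k)) none == PySem.Str.slice s2 none (some k)

-- itertools.combinations(keys, 2): all pairs (keys[i], keys[j]) with i < j, i-major
def combinations2 (l : List String) : List (String × String) :=
  match l with
  | [] => []
  | x :: xs => xs.map (fun y => (x, y)) ++ combinations2 xs

def k_edges (data : List (String × String)) (k : Int) : List String :=
  (combinations2 (PySem.Dict.mk data).keys).foldl (fun edges uv =>
    -- data[u], data[v]: keys come from the dict itself, so the lookup always succeeds
    let u_dna := ((PySem.Dict.mk data).get? uv.1).getD ""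
    let v_dna := ((PySem.Dict.mk data).get? uv.2).getD ""
    let edges := if is_k_overlap u_dna v_dna k then edges ++ [uv.1 ++ " " ++ uv.2] else edges
    if is_k_overlap v_dna u_dna k then edges ++ [uv.2 ++ " " ++ uv.1] else edges) []

-- ===== PORT B =====
def prefOf (s : String) (k : Int) : String := PySem.Str.slice s none (some k)   -- s[:k]
def sufOf (s : String) (k : Int) : String := PySem.Str.slice s (some (-k)) none -- s[-k:]

-- d.setdefault(key, []).append(j)
def addBucket (d : PySem.Dict String (List Nat)) (key : String) (j : Nat) :
    PySem.Dict String (List Nat) :=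
  d.insert key (d.getD key [] ++ [j])

-- the single loop of Source B that fills by_prefix and by_suffix
def buildBuckets (seqs : List String) (k : Int) :
    PySem.Dict String (List Nat) × PySem.Dict String (List Nat) :=
  (List.range seqs.length).foldl
    (fun d j => (addBucket d.1 (prefOf (seqs.getD j "") k) j,
                 addBucket d.2 (sufOf (seqs.getD j "") k) j))
    (PySem.Dict.empty, PySem.Dict.empty)

-- the two-pointer while loops of Source B, as recursion on the two ascending lists
def mergeEdges (u : String) (names : List String) (outs ins : List Nat) : List String :=
  match outs, ins with
  | [], [] => []
  | a :: as, [] => (u ++ " " ++ names.getD a "") :: mergeEdges u names as []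
  | [], b :: bs => (names.getD b "" ++ " " ++ u) :: mergeEdges u names [] bs
  | a :: as, b :: bs =>
    if a < b then (u ++ " " ++ names.getD a "") :: mergeEdges u names as (b :: bs)
    else if b < a then (names.getD b "" ++ " " ++ u) :: mergeEdges u names (a :: as) bs
    else (u ++ " " ++ names.getD a "") :: (names.getD b "" ++ " " ++ u) :: mergeEdges u names as bs
termination_by outs.length + ins.length

def k_edges_alt (data : List (String × String)) (k : Int) : List String :=
  let names := data.map (fun p => p.1)
  let seqs := data.map (fun p => p.2)
  let n := names.length
  let bks := buildBuckets seqs k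
  (List.range n).foldl (fun edges i =>
    let outs := (bks.1.getD (sufOf (seqs.getD i "") k) []).filter (fun j => i < j)
    let ins := (bks.2.getD (prefOf (seqs.getD i "") k) []).filter (fun j => i < j)
    edges ++ mergeEdges (names.getD i "") names outs ins) []

-- ===== PRECONDITION & SPEC =====
-- Pre_ excludes lists with duplicate names: A's argument is a Python dict, which cannot
-- represent them (duplicates collapse before A runs), so the association list's behaviour
-- there corresponds to no Python run.
def Pre_k_edges (data : List (String × String)) (k : Int) : Prop :=
  (data.map (fun p => p.1)).Nodup
instance (data : List (String × String)) (k : Int) : Decidable (Pre_k_edges data k) := by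
  unfold Pre_k_edges; infer_instance

def pvWitness_k_edges : (List (String × String)) × Int := ([("a", "AG"), ("b", "GT")], 1)

def Spec_k_edges (data : List (String × String)) (k : Int) (out : List String) : Prop := out = k_edges_alt data k
instance (data : List (String × String)) (k : Int) (out : List String) : Decidable (Spec_k_edges data k out) := by unfold Spec_k_edges; infer_instance

-- ===== CLAIM (what is proved, stated in full; the proofs are below) =====
def Claim_equal_k_edges : Prop := ∀ (data : List (String × String)) (k : Int), Dom_k_edges data k → Pre_k_edges data k → Spec_k_edges data k (k_edges data k)

-- ===== LEMMAS AND PROOFS =====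

-- common normal form: for each element, pair it with every later element
def pairsF {α β : Type} (G : α → α → List β) : List α → List β
  | [] => []
  | x :: xs => xs.flatMap (G x) ++ pairsF G xs

theorem flatMap_congr_mem {α β : Type} {f g : α → List β} {l : List α}
    (h : ∀ x ∈ l, f x = g x) : l.flatMap f = l.flatMap g := by
  induction l with
  | nil => rfl
  | cons x xs ih =>
    simp only [List.flatMap_cons, h x (by simp), ih fun y hy => h y (by simp [hy])]

theorem pairsF_congr {α β : Type} {G G' : α → α → List β} {l : List α}
    (h : ∀ x ∈ l, ∀ y ∈ l, G x y = G' x y) : pairsF G l = pairsF G' l := by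
  induction l with
  | nil => rfl
  | cons x xs ih =>
    simp only [pairsF]
    rw [flatMap_congr_mem (fun y hy => h x (by simp) y (by simp [hy])),
        ih (fun a ha b hb => h a (by simp [ha]) b (by simp [hb]))]

theorem pairsF_map {α γ β : Type} (f : α → γ) (G : γ → γ → List β) (l : List α) :
    pairsF G (l.map f) = pairsF (fun x y => G (f x) (f y)) l := by
  induction l with
  | nil => rfl
  | cons x xs ih => simp [pairsF, List.flatMap_map, ih]

-- A's foldl with two conditional appends, as a flatMap
theorem foldl_two_if {α β : Type} (p q : α → Bool) (f g : α → β) (l : List α) (acc : List β) :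
    l.foldl (fun edges x =>
      let edges := if p x then edges ++ [f x] else edges
      if q x then edges ++ [g x] else edges) acc
    = acc ++ l.flatMap (fun x => (if p x then [f x] else []) ++ (if q x then [g x] else [])) := by
  induction l generalizing acc with
  | nil => simp
  | cons x xs ih => cases hp : p x <;> cases hq : q x <;> simp [ih, hp, hq]

theorem combinations2_flatMap {β : Type} (h : String → String → List β) (l : List String) :
    (combinations2 l).flatMap (fun uv => h uv.1 uv.2) = pairsF h l := by
  induction l with
  | nil => rfl
  | cons x xs ih => simp [combinations2, pairsF, List.flatMap_map, ih]

-- index form: flatMap over i and over later j equals pairsF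
theorem getD_map {α β : Type} (f : α → β) (l : List α) (i : Nat) (d : α) :
    (l.map f).getD i (f d) = f (l.getD i d) := by
  induction l generalizing i with
  | nil => simp
  | cons x xs ih => cases i with
    | zero => simp
    | succ m => simp only [List.getD_cons_succ]; exact ih m

theorem flatMap_range_getD {α β : Type} (l : List α) (d : α) (F : α → List β) :
    (List.range l.length).flatMap (fun i => F (l.getD i d)) = l.flatMap F := by
  induction l with
  | nil => rfl
  | cons x xs ih =>
    rw [List.length_cons, List.range_succ_eq_map]
    simp only [List.flatMap_cons, List.flatMap_map]
    simp only [List.getD_cons_zero, List.getD_cons_succ, Nat.succ_eq_add_one]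
    rw [ih]

theorem index_form_eq_pairsF {α β : Type} (L : List α) (d : α) (G : α → α → List β) :
    (List.range L.length).flatMap (fun i =>
      ((List.range L.length).filter (fun j => i < j)).flatMap (fun j =>
        G (L.getD i d) (L.getD j d)))
    = pairsF G L := by
  induction L with
  | nil => rfl
  | cons x xs ih =>
    rw [List.length_cons, List.range_succ_eq_map]
    simp only [List.flatMap_cons, List.flatMap_map]
    have h0 : (List.filter (fun j => 0 < j) (0 :: List.map Nat.succ (List.range xs.length)))
        = List.map Nat.succ (List.range xs.length) := by
      rw [List.filter_cons, if_neg (by simp)]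
      apply List.filter_eq_self.2
      intro a ha
      rcases List.mem_map.1 ha with ⟨b, _, rfl⟩
      simp
    have hstep : ∀ i : Nat,
        (List.filter (fun j => Nat.succ i < j) (0 :: List.map Nat.succ (List.range xs.length)))
        = List.map Nat.succ ((List.range xs.length).filter (fun j => i < j)) := by
      intro i
      rw [List.filter_cons]
      simp only [decide_eq_true_eq]
      rw [if_neg (by omega), List.filter_map]
      congr 1
      apply List.filter_congr
      intro a _
      simp
    rw [show pairsF G (x :: xs) = xs.flatMap (G x) ++ pairsF G xs from rfl]
    rw [h0]
    have hfirst : (List.map Nat.succ (List.range xs.length)).flatMap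
        (fun j => G ((x :: xs).getD 0 d) ((x :: xs).getD j d)) = xs.flatMap (G x) := by
      rw [List.flatMap_map]
      simpa using flatMap_range_getD xs d (fun y => G x y)
    rw [hfirst]
    congr 1
    calc (List.range xs.length).flatMap (fun i =>
            ((0 :: List.map Nat.succ (List.range xs.length)).filter
              (fun j => Nat.succ i < j)).flatMap
              (fun j => G ((x :: xs).getD (Nat.succ i) d) ((x :: xs).getD j d)))
        = (List.range xs.length).flatMap (fun i =>
            ((List.range xs.length).filter (fun j => i < j)).flatMap
              (fun j => G (xs.getD i d) (xs.getD j d))) := by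
          apply flatMap_congr_mem
          intro i _
          rw [hstep i, List.flatMap_map]
          rfl
      _ = pairsF G xs := ih

-- first-match lookup of a key at position i, under nodup keys
theorem lookup_mem {data : List (String × String)}
    (hnd : (data.map (fun p => p.1)).Nodup) {p : String × String} (hp : p ∈ data) :
    (PySem.Dict.mk data).get? p.1 = some p.2 := by
  induction data with
  | nil => cases hp
  | cons q rest ih =>
    rcases List.mem_cons.1 hp with h | hp'
    · subst h
      obtain ⟨a, b⟩ := p
      simp [PySem.Dict.get?_mk_cons]
    · have hnd' : (rest.map (fun p => p.1)).Nodup := by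
        simp only [List.map_cons, List.nodup_cons] at hnd; exact hnd.2
      have hmem : p.1 ∈ rest.map (fun p => p.1) := List.mem_map.2 ⟨p, hp', rfl⟩
      have hne : (q.1 == p.1) = false := by
        simp only [List.map_cons, List.nodup_cons] at hnd
        exact beq_eq_false_iff_ne.2 (fun h => hnd.1 (h ▸ hmem))
      obtain ⟨a, b⟩ := q
      rw [show PySem.Dict.mk ((a, b) :: rest) = { items := (a, b) :: rest } from rfl,
          PySem.Dict.get?_mk_cons]
      simp only at hne
      rw [hne]
      simpa using ih hnd' hp'

-- bucket invariant: getD of the filled dict is the ordered list of matching indices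
theorem bucket_inv (keyOf : Nat → String) (l : List Nat) (d : PySem.Dict String (List Nat)) :
    ∀ key, (l.foldl (fun d j => addBucket d (keyOf j) j) d).getD key []
      = d.getD key [] ++ l.filter (fun j => keyOf j == key) := by
  induction l generalizing d with
  | nil => simp
  | cons j rest ih =>
    intro key
    rw [List.foldl_cons, ih, List.filter_cons]
    by_cases h : keyOf j = key
    · simp [addBucket, h]
    · simp [addBucket, PySem.Dict.getD_insert, h, Ne.symm h]

theorem getD_empty_bucket (key : String) :
    (PySem.Dict.empty : PySem.Dict String (List Nat)).getD key [] = [] := by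
  rfl

-- the merge of two filtered sublists of a strictly increasing list, as a flatMap
theorem merge_eq (u : String) (names : List String) (p q : Nat → Bool) :
    ∀ l : List Nat, l.Pairwise (· < ·) →
      mergeEdges u names (l.filter p) (l.filter q)
      = l.flatMap (fun j =>
          (if p j then [u ++ " " ++ names.getD j ""] else [])
          ++ (if q j then [names.getD j "" ++ " " ++ u] else [])) := by
  intro l hl
  induction l with
  | nil => simp [mergeEdges]
  | cons x xs ih =>
    have hlt : ∀ y ∈ xs, x < y := fun y hy => (List.pairwise_cons.1 hl).1 y hy
    have hxs := ih (List.pairwise_cons.1 hl).2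
    rw [List.filter_cons, List.filter_cons, List.flatMap_cons]
    by_cases hp : p x = true <;> by_cases hq : q x = true
    · -- both directions fire at x
      simp only [hp, hq, if_true]
      rw [show mergeEdges u names (x :: xs.filter p) (x :: xs.filter q)
            = (u ++ " " ++ names.getD x "") :: (names.getD x "" ++ " " ++ u)
              :: mergeEdges u names (xs.filter p) (xs.filter q) by
          rw [mergeEdges]; rw [if_neg (lt_irrefl x), if_neg (lt_irrefl x)]]
      rw [hxs]; simp
    · -- only p fires at x
      simp only [hp, hq, Bool.false_eq_true, if_true, if_false]
      cases hin : xs.filter q with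
      | nil =>
        rw [show mergeEdges u names (x :: xs.filter p) []
              = (u ++ " " ++ names.getD x "") :: mergeEdges u names (xs.filter p) [] by
            rw [mergeEdges]]
        rw [← hin, hxs]; simp
      | cons b bs =>
        have hxb : x < b := hlt b (List.mem_of_mem_filter (hin ▸ List.mem_cons_self ..))
        rw [show mergeEdges u names (x :: xs.filter p) (b :: bs)
              = (u ++ " " ++ names.getD x "") :: mergeEdges u names (xs.filter p) (b :: bs) by
            rw [mergeEdges]; rw [if_pos hxb]]
        rw [← hin, hxs]; simp
    · -- only q fires at x
      simp only [hp, hq, Bool.false_eq_true, if_true, if_false]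
      cases hout : xs.filter p with
      | nil =>
        rw [show mergeEdges u names [] (x :: xs.filter q)
              = (names.getD x "" ++ " " ++ u) :: mergeEdges u names [] (xs.filter q) by
            rw [mergeEdges]]
        rw [← hout, hxs]; simp
      | cons a as =>
        have hxa : x < a := hlt a (List.mem_of_mem_filter (hout ▸ List.mem_cons_self ..))
        rw [show mergeEdges u names (a :: as) (x :: xs.filter q)
              = (names.getD x "" ++ " " ++ u) :: mergeEdges u names (a :: as) (xs.filter q) by
            rw [mergeEdges]; rw [if_neg (by omega), if_pos hxa]]
        rw [← hout, hxs]; simp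
    · -- neither fires at x
      simp only [hp, hq, Bool.false_eq_true, if_false, List.nil_append]
      exact hxs

-- body of the common form, on pairs (name, dna)
def edgeBody (k : Int) (p q : String × String) : List String :=
  (if is_k_overlap p.2 q.2 k then [p.1 ++ " " ++ q.1] else [])
  ++ (if is_k_overlap q.2 p.2 k then [q.1 ++ " " ++ p.1] else [])

theorem A_eq_pairsF (data : List (String × String)) (k : Int)
    (hnd : (data.map (fun p => p.1)).Nodup) :
    k_edges data k = pairsF (edgeBody k) data := by
  unfold k_edges
  rw [foldl_two_if
      (fun uv : String × String => is_k_overlap (((PySem.Dict.mk data).get? uv.1).getD "")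
        (((PySem.Dict.mk data).get? uv.2).getD "") k)
      (fun uv : String × String => is_k_overlap (((PySem.Dict.mk data).get? uv.2).getD "")
        (((PySem.Dict.mk data).get? uv.1).getD "") k)
      (fun uv => uv.1 ++ " " ++ uv.2) (fun uv => uv.2 ++ " " ++ uv.1)]
  rw [List.nil_append, PySem.Dict.keys_mk,
      combinations2_flatMap
        (fun u v => (if is_k_overlap (((PySem.Dict.mk data).get? u).getD "")
            (((PySem.Dict.mk data).get? v).getD "") k then [u ++ " " ++ v] else [])
          ++ (if is_k_overlap (((PySem.Dict.mk data).get? v).getD "")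
            (((PySem.Dict.mk data).get? u).getD "") k then [v ++ " " ++ u] else [])),
      pairsF_map]
  exact pairsF_congr fun x hx y hy => by
    rw [lookup_mem hnd hx, lookup_mem hnd hy]; rfl

theorem B_eq_pairsF (data : List (String × String)) (k : Int) :
    k_edges_alt data k = pairsF (edgeBody k) data := by
  unfold k_edges_alt
  simp only []
  rw [PySem.List.foldl_append_eq_flatMap, List.nil_append]
  have hbkt1 : ∀ key, ((buildBuckets (data.map (fun p => p.2)) k).1).getD key []
      = (List.range data.length).filter
          (fun j => prefOf ((data.map (fun p => p.2)).getD j "") k == key) := by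
    intro key
    unfold buildBuckets
    rw [PySem.List.foldl_prod_mk
        (fun d j => addBucket d (prefOf ((data.map (fun p => p.2)).getD j "") k) j)
        (fun d j => addBucket d (sufOf ((data.map (fun p => p.2)).getD j "") k) j)]
    rw [show ((List.foldl (fun d j => addBucket d (prefOf ((data.map (fun p => p.2)).getD j "") k) j)
          PySem.Dict.empty (List.range (data.map (fun p => p.2)).length),
        List.foldl (fun d j => addBucket d (sufOf ((data.map (fun p => p.2)).getD j "") k) j)
          PySem.Dict.empty (List.range (data.map (fun p => p.2)).length))).1
        = List.foldl (fun d j => addBucket d (prefOf ((data.map (fun p => p.2)).getD j "") k) j)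
          PySem.Dict.empty (List.range (data.map (fun p => p.2)).length) from rfl]
    rw [bucket_inv (fun j => prefOf ((data.map (fun p => p.2)).getD j "") k)]
    rw [getD_empty_bucket, List.nil_append, List.length_map]
  have hbkt2 : ∀ key, ((buildBuckets (data.map (fun p => p.2)) k).2).getD key []
      = (List.range data.length).filter
          (fun j => sufOf ((data.map (fun p => p.2)).getD j "") k == key) := by
    intro key
    unfold buildBuckets
    rw [PySem.List.foldl_prod_mk
        (fun d j => addBucket d (prefOf ((data.map (fun p => p.2)).getD j "") k) j)
        (fun d j => addBucket d (sufOf ((data.map (fun p => p.2)).getD j "") k) j)]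
    rw [show ((List.foldl (fun d j => addBucket d (prefOf ((data.map (fun p => p.2)).getD j "") k) j)
          PySem.Dict.empty (List.range (data.map (fun p => p.2)).length),
        List.foldl (fun d j => addBucket d (sufOf ((data.map (fun p => p.2)).getD j "") k) j)
          PySem.Dict.empty (List.range (data.map (fun p => p.2)).length))).2
        = List.foldl (fun d j => addBucket d (sufOf ((data.map (fun p => p.2)).getD j "") k) j)
          PySem.Dict.empty (List.range (data.map (fun p => p.2)).length) from rfl]
    rw [bucket_inv (fun j => sufOf ((data.map (fun p => p.2)).getD j "") k)]
    rw [getD_empty_bucket, List.nil_append, List.length_map]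
  rw [← index_form_eq_pairsF data ("", "") (edgeBody k)]
  simp only [List.length_map]
  apply flatMap_congr_mem
  intro i _
  rw [hbkt1, hbkt2]
  rw [List.filter_filter, List.filter_filter]
  have hcomm1 : (fun j => decide (i < j) && (prefOf ((data.map (fun p => p.2)).getD j "") k
        == sufOf ((data.map (fun p => p.2)).getD i "") k))
      = (fun j => (prefOf ((data.map (fun p => p.2)).getD j "") k
        == sufOf ((data.map (fun p => p.2)).getD i "") k) && decide (i < j)) := by
    funext j; exact Bool.and_comm _ _
  have hcomm2 : (fun j => decide (i < j) && (sufOf ((data.map (fun p => p.2)).getD j "") k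
        == prefOf ((data.map (fun p => p.2)).getD i "") k))
      = (fun j => (sufOf ((data.map (fun p => p.2)).getD j "") k
        == prefOf ((data.map (fun p => p.2)).getD i "") k) && decide (i < j)) := by
    funext j; exact Bool.and_comm _ _
  rw [hcomm1, hcomm2, ← List.filter_filter, ← List.filter_filter]
  rw [merge_eq _ _ _ _ _ ((List.pairwise_lt_range).filter _)]
  apply flatMap_congr_mem
  intro j _
  have hn : ∀ (m : Nat), (data.map (fun p => p.1)).getD m "" = ((data.getD m ("", "")).1) :=
    fun m => getD_map (fun p => p.1) data m ("", "")
  have hs : ∀ (m : Nat), (data.map (fun p => p.2)).getD m "" = ((data.getD m ("", "")).2) :=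
    fun m => getD_map (fun p => p.2) data m ("", "")
  simp only [hn, hs, edgeBody, is_k_overlap, prefOf, sufOf]
  congr 2
  rw [show ∀ (a b : String), (a == b) = (b == a) from fun a b => by
    cases h : a == b <;> cases h' : b == a <;> simp_all [beq_iff_eq]]

-- ===== VERDICT (by name: the statement is the Claim_ definition above) =====
theorem k_edges_spec : Claim_equal_k_edges := by
  intro data k _ hpre
  unfold Spec_k_edges
  rw [A_eq_pairsF data k hpre, B_eq_pairsF data k]
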